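-- pv_equiv track=rewrite | github.com/Hanjuri/Baekjoon_juri | 250107/행복한 수열의 개수/number-of-happy-sequence.py | is_happy_sequence
-- ===== SOURCE A (Python) =====
-- def is_happy_sequence(arr, m):
--     count = 1
--     prev = arr[0] #이전 숫자 저장
--
--     for i in range(1, len(arr)):
--         if arr[i] == prev :
--             count += 1
--             if count >= m :
--                 return True
--         else :
--             count = 1 #초기화
--         prev = arr[i]
--
--     return count >= m #m=1인 경우 고려
-- ===== SOURCE B (Python) =====
-- def is_happy_sequence(arr, m):
--     # build the list of maximal-run lengths, then reduce: any run of length >= m?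
--     def run_lengths(xs):
--         res = []
--         i = 0
--         n = len(xs)
--         while i < n:
--             j = i + 1
--             while j < n and xs[j] == xs[i]:
--                 j += 1
--             res.append(j - i)
--             i = j
--         return res
--     return any(r >= m for r in run_lengths(arr))
-- ===== Notes on version B (the rewrite author's own statement) =====
-- stated objective: alternative
-- what changed: B decomposes the problem into building the list of maximal run lengths and then reducing with any(r >= m), instead of A's running counter with early return and a final check.
import Mathlib
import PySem

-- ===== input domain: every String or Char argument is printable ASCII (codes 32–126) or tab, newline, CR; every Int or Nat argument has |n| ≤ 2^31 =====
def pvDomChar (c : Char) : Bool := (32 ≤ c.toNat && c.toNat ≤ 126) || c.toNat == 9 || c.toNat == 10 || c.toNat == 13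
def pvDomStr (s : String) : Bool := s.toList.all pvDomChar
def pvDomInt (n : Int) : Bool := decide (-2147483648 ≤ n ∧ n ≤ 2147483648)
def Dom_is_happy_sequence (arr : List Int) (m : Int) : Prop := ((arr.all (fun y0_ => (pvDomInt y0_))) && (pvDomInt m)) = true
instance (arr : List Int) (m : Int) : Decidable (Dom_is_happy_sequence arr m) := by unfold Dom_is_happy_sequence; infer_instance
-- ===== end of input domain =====

-- B replaces A's running counter + early return by building the list of maximal
-- run lengths and reducing with `any`; same O(n) cost, different decomposition.
-- Equivalence is about the RETURN value on non-empty input (see Pre_ below).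

-- ===== PORT A =====
-- the for-loop of A: state (count, prev), early return on count >= m
def pvALoop (m : Int) : List Int → Int → Int → Bool
  | [], count, _ => decide (m ≤ count)
  | x :: ys, count, prev =>
    if x = prev then
      if m ≤ count + 1 then true else pvALoop m ys (count + 1) x
    else
      pvALoop m ys 1 x

def is_happy_sequence (arr : List Int) (m : Int) : Bool :=
  match arr with
  | [] => false            -- Python A raises IndexError here (arr[0]); excluded by Pre_
  | a :: rest => pvALoop m rest 1 a

-- ===== PORT B =====
-- inner while of Source B: length of the leading run equal to x
def pvLeadCount (x : Int) : List Int → Nat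
  | [] => 0
  | y :: ys => if y = x then pvLeadCount x ys + 1 else 0

-- outer while of Source B: list of maximal run lengths
def pvRunLengths : List Int → List Nat
  | [] => []
  | x :: rest => (pvLeadCount x rest + 1) :: pvRunLengths (rest.drop (pvLeadCount x rest))
termination_by xs => xs.length
decreasing_by
  simp only [List.length_drop, List.length_cons]
  omega

def is_happy_sequence_alt (arr : List Int) (m : Int) : Bool :=
  (pvRunLengths arr).any (fun r => decide (m ≤ (r : Int)))

-- ===== PRECONDITION & SPEC =====
-- Pre_ excludes only the empty list, on which Python A raises IndexError at arr[0].
def Pre_is_happy_sequence (arr : List Int) (m : Int) : Prop := arr ≠ []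
instance (arr : List Int) (m : Int) : Decidable (Pre_is_happy_sequence arr m) := by
  unfold Pre_is_happy_sequence; infer_instance

def pvWitness_is_happy_sequence : List Int × Int := ([1, 1, 2], 2)

def Spec_is_happy_sequence (arr : List Int) (m : Int) (out : Bool) : Prop := out = is_happy_sequence_alt arr m
instance (arr : List Int) (m : Int) (out : Bool) : Decidable (Spec_is_happy_sequence arr m out) := by unfold Spec_is_happy_sequence; infer_instance

-- ===== CLAIM (what is proved, stated in full; the proofs are below) =====
def Claim_equal_is_happy_sequence : Prop := ∀ (arr : List Int) (m : Int), Dom_is_happy_sequence arr m → Pre_is_happy_sequence arr m → Spec_is_happy_sequence arr m (is_happy_sequence arr m)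


-- ===== LEMMAS AND PROOFS =====

-- the loop of A, characterised by the runs decomposition of B
lemma pvALoop_eq_runs (m : Int) :
    ∀ (ys : List Int) (count prev : Int), 1 ≤ count → (count = 1 ∨ count < m) →
      pvALoop m ys count prev =
        (decide (m ≤ count + (pvLeadCount prev ys : Int)) ||
          (pvRunLengths (ys.drop (pvLeadCount prev ys))).any (fun r => decide (m ≤ (r : Int)))) := by
  intro ys
  induction ys with
  | nil =>
    intro count prev _ _
    simp [pvALoop, pvLeadCount, pvRunLengths]
  | cons x ys ih =>
    intro count prev hc hinv
    by_cases hx : x = prev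
    · -- run continues
      have hl : pvLeadCount prev (x :: ys) = pvLeadCount prev ys + 1 := by
        simp [pvLeadCount, hx]
      have hAL : pvALoop m (x :: ys) count prev
          = if m ≤ count + 1 then true else pvALoop m ys (count + 1) x := by
        simp [pvALoop, hx]
      rw [hAL, hl, List.drop_succ_cons]
      by_cases h2 : m ≤ count + 1
      · rw [if_pos h2]
        have hd : decide (m ≤ count + ((pvLeadCount prev ys + 1 : Nat) : Int)) = true := by
          rw [decide_eq_true_eq]
          have := Int.natCast_nonneg (pvLeadCount prev ys)
          push_cast
          omega
        rw [hd, Bool.true_or]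
      · rw [if_neg h2]
        have hx' : pvLeadCount prev ys = pvLeadCount x ys := by rw [hx]
        rw [ih (count + 1) x (by omega) (Or.inr (by omega)), hx']
        congr 1
        rw [decide_eq_decide]
        push_cast
        omega
    · -- run resets
      have hl : pvLeadCount prev (x :: ys) = 0 := by
        simp [pvLeadCount, hx]
      have hAL : pvALoop m (x :: ys) count prev = pvALoop m ys 1 x := by
        simp [pvALoop, hx]
      rw [hAL, hl, List.drop_zero, ih 1 x le_rfl (Or.inl rfl), pvRunLengths]
      simp only [List.any_cons, Nat.cast_zero, add_zero]
      by_cases hm : m ≤ 1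
      · have l1 : decide (m ≤ (1 : Int) + (pvLeadCount x ys : Int)) = true := by
          rw [decide_eq_true_eq]
          have := Int.natCast_nonneg (pvLeadCount x ys)
          omega
        have r1 : decide (m ≤ count) = true := by
          rw [decide_eq_true_eq]; omega
        rw [l1, r1, Bool.true_or, Bool.true_or]
      · have hcm : count < m := by
          rcases hinv with h1 | h1
          · omega
          · exact h1
        have r0 : decide (m ≤ count) = false := by
          rw [decide_eq_false_iff_not]; omega
        have ld : decide (m ≤ (1 : Int) + (pvLeadCount x ys : Int))
            = decide (m ≤ ((pvLeadCount x ys + 1 : Nat) : Int)) := by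
          rw [decide_eq_decide]; push_cast; omega
        rw [r0, Bool.false_or, ld]

-- ===== VERDICT (by name: the statement is the Claim_ definition above) =====
theorem is_happy_sequence_spec : Claim_equal_is_happy_sequence := by
  intro arr m _ hpre
  unfold Spec_is_happy_sequence
  match arr with
  | [] => exact absurd rfl hpre
  | a :: rest =>
    show pvALoop m rest 1 a = _
    rw [pvALoop_eq_runs m rest 1 a le_rfl (Or.inl rfl)]
    unfold is_happy_sequence_alt
    rw [pvRunLengths]
    simp only [List.any_cons]
    congr 1
    rw [decide_eq_decide]
    push_cast
    omega
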